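-- pv_equiv track=rewrite | github.com/csplink/csp | tools/drawio_tool/drawio.py | __isText
-- ===== SOURCE A (Python) =====
-- def __isText(attrib: dict[str, str]) -> bool:
--     # value!=none && shape==text && fillColor!=none/default
--     times = 0
--     if attrib.get("value", "") != "":
--         times += 1
--     styles = attrib.get("style", "").strip(";").split(";")
--     for style in styles:
--         if style == "text":
--             times += 1
--         elif (
--             style.startswith("fillColor=")
--             and style != "fillColor=none"
--             and style != "fillColor=default"
--         ):
--             return False
--
--     return times > 0
-- ===== SOURCE B (Python) =====
-- def __isText(attrib: dict[str, str]) -> bool: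
--     # Parse each style token into a (key, sep, value) triple first, then judge
--     # the parsed form: no counter, no fused early-return loop.
--     tokens = attrib.get("style", "").strip(";").split(";")
--     parsed = [t.partition("=") for t in tokens]
--     if any(k == "fillColor" and sep and v not in ("none", "default")
--            for k, sep, v in parsed):
--         return False
--     return attrib.get("value", "") != "" or any(
--         k == "text" and not sep for k, sep, v in parsed)
-- ===== Notes on version B (the rewrite author's own statement) =====
-- stated objective: alternative
-- what changed: B first parses every style token into a structured (key, sep, value) triple with str.partition('=') and then evaluates the text/fillColor conditions on the parsed representation, instead of A's single fused loop that does raw prefix/whole-string comparisons while maintaining an integer 'times' counter with an early return.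
import Mathlib
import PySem

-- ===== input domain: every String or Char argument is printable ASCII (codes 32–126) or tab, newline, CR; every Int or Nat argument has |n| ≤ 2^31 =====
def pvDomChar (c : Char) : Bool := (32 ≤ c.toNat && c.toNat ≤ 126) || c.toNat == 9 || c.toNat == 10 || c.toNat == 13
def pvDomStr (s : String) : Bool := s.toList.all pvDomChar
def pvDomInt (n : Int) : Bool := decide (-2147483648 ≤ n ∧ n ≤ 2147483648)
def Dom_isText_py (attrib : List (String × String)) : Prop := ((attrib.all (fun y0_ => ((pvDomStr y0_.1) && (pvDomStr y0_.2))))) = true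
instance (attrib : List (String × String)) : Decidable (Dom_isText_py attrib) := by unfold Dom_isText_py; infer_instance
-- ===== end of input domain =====

-- B parses every style token into a (key, sep, value) triple via partition("=") and
-- judges the parsed form, instead of A's fused counter loop (objective: alternative).

-- shared totalisation of s.strip(";").split(";"): the separator is the nonempty
-- literal ";", so Str.split? is always 'some'; '.getD []' only discharges the Option
def pySplitStyles (s : String) : List String :=
  (PySem.Str.split? (PySem.Str.stripChars s ";") ";").getD []

-- ===== PORT A =====
-- A's for-loop with its early 'return False' and the running 'times' counter
def isTextLoopA : List String → Int → Bool
  | [], times => decide (times > 0)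
  | style :: rest, times =>
    if style = "text" then isTextLoopA rest (times + 1)
    else if PySem.Str.startswith style "fillColor=" ∧ style ≠ "fillColor=none" ∧ style ≠ "fillColor=default" then
      false
    else isTextLoopA rest times

def isText_py (attrib : List (String × String)) : Bool :=
  let times : Int := 0
  let times := if (PySem.Dict.mk attrib).getD "value" "" ≠ "" then times + 1 else times
  let styles := pySplitStyles ((PySem.Dict.mk attrib).getD "style" "")
  isTextLoopA styles times

-- ===== PORT B =====
-- t.partition("="): hand port (PySem has no partition), exact for the one-char
-- separator "=" used here: split at the FIRST '=', sep piece "=" if found else ""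
def pyPartitionEqChars : List Char → List Char × List Char × List Char
  | [] => ([], [], [])
  | c :: rest =>
    if c = '=' then ([], ['='], rest)
    else
      let r := pyPartitionEqChars rest
      (c :: r.1, r.2.1, r.2.2)

def pyPartitionEq (s : String) : String × String × String :=
  let r := pyPartitionEqChars s.toList
  (String.ofList r.1, String.ofList r.2.1, String.ofList r.2.2)

def isText_py_alt (attrib : List (String × String)) : Bool :=
  let tokens := pySplitStyles ((PySem.Dict.mk attrib).getD "style" "")
  let parsed := tokens.map pyPartitionEq
  if parsed.any (fun p => p.1 = "fillColor" && p.2.1 ≠ "" && p.2.2 ≠ "none" && p.2.2 ≠ "default") then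
    false
  else
    decide ((PySem.Dict.mk attrib).getD "value" "" ≠ "") ||
      parsed.any (fun p => p.1 = "text" && p.2.1 = "")

-- ===== PRECONDITION & SPEC =====
def Spec_isText_py (attrib : List (String × String)) (out : Bool) : Prop := out = isText_py_alt attrib
instance (attrib : List (String × String)) (out : Bool) : Decidable (Spec_isText_py attrib out) := by unfold Spec_isText_py; infer_instance

-- ===== CLAIM (what is proved, stated in full; the proofs are below) =====
def Claim_equal_isText_py : Prop := ∀ (attrib : List (String × String)), Dom_isText_py attrib → Spec_isText_py attrib (isText_py attrib)

-- ===== LEMMAS AND PROOFS =====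

-- characterisation of A's loop: it returns false iff some style is a disqualifying
-- fillColor, and otherwise whether times plus the number of "text" styles is positive
theorem isTextLoopA_eq (styles : List String) (times : Int) :
    isTextLoopA styles times =
      if styles.any (fun s => PySem.Str.startswith s "fillColor=" && s ≠ "fillColor=none" && s ≠ "fillColor=default") then
        false
      else decide (times + styles.count "text" > 0) := by
  induction styles generalizing times with
  | nil => simp [isTextLoopA]
  | cons s rest ih =>
    by_cases hs : s = "text"
    · subst hs
      have htxt : (PySem.Str.startswith "text" "fillColor=" && decide (("text" : String) ≠ "fillColor=none") && decide (("text" : String) ≠ "fillColor=default")) = false := by decide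
      rw [show isTextLoopA ("text" :: rest) times = isTextLoopA rest (times + 1) from rfl,
          ih, List.any_cons, htxt, Bool.false_or, List.count_cons_self]
      split_ifs with h
      · rfl
      · simp only [decide_eq_decide]
        push_cast
        omega
    · by_cases hb : PySem.Str.startswith s "fillColor=" = true ∧ s ≠ "fillColor=none" ∧ s ≠ "fillColor=default"
      · have hbt : (PySem.Str.startswith s "fillColor=" && decide (s ≠ "fillColor=none") && decide (s ≠ "fillColor=default")) = true := by
          rw [hb.1]
          simp only [Bool.true_and, Bool.and_eq_true, decide_eq_true_eq]
          exact ⟨hb.2.1, hb.2.2⟩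
        rw [show isTextLoopA (s :: rest) times = false from by
              simp only [isTextLoopA, if_neg hs, if_pos hb],
            List.any_cons, hbt, Bool.true_or, if_pos rfl]
      · have hbb : (PySem.Str.startswith s "fillColor=" && decide (s ≠ "fillColor=none") && decide (s ≠ "fillColor=default")) = false := by
          by_cases h1 : PySem.Str.startswith s "fillColor=" = true
          · by_cases h2 : s = "fillColor=none"
            · simp [h2]
            · by_cases h3 : s = "fillColor=default"
              · simp [h3]
              · exact absurd ⟨h1, h2, h3⟩ hb
          · rw [Bool.not_eq_true] at h1
            simp only [h1, Bool.false_and]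
        rw [show isTextLoopA (s :: rest) times = isTextLoopA rest times from by
              simp only [isTextLoopA, if_neg hs, if_neg hb],
            ih, List.any_cons, hbb, Bool.false_or, List.count_cons_of_ne hs]

-- pyPartitionEqChars on a list without '='
theorem partEq_no (cs : List Char) (h : '=' ∉ cs) : pyPartitionEqChars cs = (cs, [], []) := by
  induction cs with
  | nil => rfl
  | cons c rest ih =>
    have hc : c ≠ '=' := fun hh => h (hh ▸ List.mem_cons_self)
    simp [pyPartitionEqChars, hc, ih (fun hm => h (List.mem_cons_of_mem _ hm))]

-- pyPartitionEqChars splits at the first '='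
theorem partEq_found (pre rest : List Char) (h : '=' ∉ pre) :
    pyPartitionEqChars (pre ++ '=' :: rest) = (pre, ['='], rest) := by
  induction pre with
  | nil => rfl
  | cons c p ih =>
    have hc : c ≠ '=' := fun hh => h (hh ▸ List.mem_cons_self)
    simp [pyPartitionEqChars, hc, ih (fun hm => h (List.mem_cons_of_mem _ hm))]

theorem partEq_cases (cs : List Char) :
    ('=' ∉ cs) ∨ ∃ pre rest, '=' ∉ pre ∧ cs = pre ++ '=' :: rest := by
  induction cs with
  | nil => exact Or.inl (by simp)
  | cons c rest ih =>
    by_cases hc : c = '='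
    · exact Or.inr ⟨[], rest, by simp, by simp [hc]⟩
    · rcases ih with h | ⟨pre, r, hp, hr⟩
      · exact Or.inl (by simp [h, Ne.symm hc])
      · exact Or.inr ⟨c :: pre, r, by simp [hp, Ne.symm hc], by simp [hr]⟩

-- the first-'=' decomposition is unique
theorem eq_split_unique : ∀ (xs ys l t : List Char), '=' ∉ xs → '=' ∉ ys →
    xs ++ '=' :: l = ys ++ '=' :: t → xs = ys ∧ l = t := by
  intro xs; induction xs with
  | nil => intro ys l t _ hy h
           cases ys with
           | nil => simpa using h
           | cons y ys' =>
             simp at h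
             exact absurd (h.1 ▸ List.mem_cons_self) hy
  | cons x xs' ih =>
    intro ys l t hx hy h
    cases ys with
    | nil =>
      simp at h
      exact absurd (h.1 ▸ List.mem_cons_self) hx
    | cons y ys' =>
      simp at h
      obtain ⟨rfl, h2⟩ := h
      obtain ⟨h3, h4⟩ := ih ys' l t (fun hm => hx (List.mem_cons_of_mem _ hm)) (fun hm => hy (List.mem_cons_of_mem _ hm)) h2
      exact ⟨by rw [h3], h4⟩

-- per-token: B's parsed fillColor test agrees with A's raw-string test
theorem badTok_eq (s : String) :
    ((pyPartitionEq s).1 = "fillColor" && (pyPartitionEq s).2.1 ≠ "" && (pyPartitionEq s).2.2 ≠ "none" && (pyPartitionEq s).2.2 ≠ "default")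
    = (PySem.Str.startswith s "fillColor=" && s ≠ "fillColor=none" && s ≠ "fillColor=default") := by
  rcases partEq_cases s.toList with h | ⟨pre, rest, hp, hcs⟩
  · have hsw : PySem.Str.startswith s "fillColor=" = false := by
      rw [Bool.eq_false_iff]
      intro hsw
      have hpre : ("fillColor=" : String).toList <+: s.toList :=
        (PySem.Chars.startswith_iff _ _).mp (by simpa using hsw)
      exact h (hpre.subset (by decide))
    replace hsw : PySem.Chars.startswith s.toList ['f','i','l','l','C','o','l','o','r','='] = false := by
      simpa using hsw
    simp [pyPartitionEq, partEq_no _ h, hsw]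
  · have hpart : pyPartitionEq s = (String.ofList pre, "=", String.ofList rest) := by
      unfold pyPartitionEq
      rw [hcs, partEq_found _ _ hp]
    by_cases hk : pre = ("fillColor" : String).toList
    · subst hk
      have hsw : PySem.Str.startswith s "fillColor=" = true := by
        have : ("fillColor=" : String).toList <+: s.toList := by
          rw [hcs, show ("fillColor=" : String).toList = ("fillColor" : String).toList ++ ['='] from by decide]
          exact ⟨rest, by simp⟩
        simpa using (PySem.Chars.startswith_iff _ _).mpr this
      have h1 : (s = "fillColor=none") ↔ (String.ofList rest = "none") := by
        rw [String.ext_iff, hcs,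
            show ("fillColor=none" : String).toList = ("fillColor" : String).toList ++ '=' :: ("none" : String).toList from by decide]
        constructor
        · intro hh
          have h2 := List.append_cancel_left hh
          have hr : rest = ("none" : String).toList := by
            injection h2
          rw [hr, String.ofList_toList]
        · intro hh
          have hr : rest = ("none" : String).toList := by
            rw [← hh, String.toList_ofList]
          rw [hr]
      have h2 : (s = "fillColor=default") ↔ (String.ofList rest = "default") := by
        rw [String.ext_iff, hcs,
            show ("fillColor=default" : String).toList = ("fillColor" : String).toList ++ '=' :: ("default" : String).toList from by decide]
        constructor
        · intro hh
          have h2 := List.append_cancel_left hh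
          have hr : rest = ("default" : String).toList := by
            injection h2
          rw [hr, String.ofList_toList]
        · intro hh
          have hr : rest = ("default" : String).toList := by
            rw [← hh, String.toList_ofList]
          rw [hr]
      replace hsw : PySem.Chars.startswith s.toList ['f','i','l','l','C','o','l','o','r','='] = true := by
        simpa using hsw
      simp [hpart, hsw, h1, h2]
    · have hsw : PySem.Str.startswith s "fillColor=" = false := by
        rw [Bool.eq_false_iff]
        intro hsw
        obtain ⟨t, ht⟩ := (PySem.Chars.startswith_iff _ _).mp (by simpa using hsw)
        rw [hcs] at ht
        have ht' : pre ++ '=' :: rest = ("fillColor" : String).toList ++ '=' :: t := by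
          simpa using ht.symm
        exact hk (eq_split_unique _ _ _ _ hp (by decide) ht').1
      have hk' : decide (String.ofList pre = "fillColor") = false := by
        apply decide_eq_false
        intro hh
        apply hk
        rw [← @String.toList_ofList pre, hh]
      replace hsw : PySem.Chars.startswith s.toList ['f','i','l','l','C','o','l','o','r','='] = false := by
        simpa using hsw
      simp [hpart, hk', hsw]

-- per-token: B's parsed "text" test agrees with A's whole-token comparison
theorem textTok_eq (s : String) :
    ((pyPartitionEq s).1 = "text" && (pyPartitionEq s).2.1 = "") = decide (s = "text") := by
  rcases partEq_cases s.toList with h | ⟨pre, rest, hp, hcs⟩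
  · have hpart : pyPartitionEq s = (String.ofList s.toList, "", "") := by
      unfold pyPartitionEq
      rw [partEq_no _ h]
    simp [hpart, String.ofList_toList]
  · have hpart : pyPartitionEq s = (String.ofList pre, "=", String.ofList rest) := by
      unfold pyPartitionEq
      rw [hcs, partEq_found _ _ hp]
    have hs : s ≠ "text" := by
      intro hh
      have : '=' ∈ s.toList := by
        rw [hcs]
        simp
      rw [hh] at this
      exact absurd this (by decide)
    simp [hpart, hs]

-- ===== VERDICT (by name: the statement is the Claim_ definition above) =====
theorem isText_py_spec : Claim_equal_isText_py := by
  intro attrib _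
  unfold Spec_isText_py isText_py isText_py_alt
  simp only [List.any_map, Function.comp_def, badTok_eq, textTok_eq, isTextLoopA_eq]
  set v := (PySem.Dict.mk attrib).getD "value" "" with hv
  set styles := pySplitStyles ((PySem.Dict.mk attrib).getD "style" "") with hstyles
  split_ifs with h hvv
  · rfl
  · have hd : decide (v ≠ "") = true := decide_eq_true hvv
    rw [hd, Bool.true_or]
    exact decide_eq_true (by omega)
  · have hd : decide (v ≠ "") = false := decide_eq_false hvv
    rw [hd, Bool.false_or]
    cases hc : styles.any (fun s => decide (s = "text"))
    · have hm : "text" ∉ styles := by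
        intro hmem
        have h' := (List.any_eq_false.mp hc) "text" hmem
        simp at h'
      have hz : List.count "text" styles = 0 := List.count_eq_zero.mpr hm
      rw [hz]
      exact decide_eq_false (by omega)
    · obtain ⟨x, hmem, hx⟩ := List.any_eq_true.mp hc
      have hm : "text" ∈ styles := by
        have : x = "text" := by simpa using hx
        rwa [this] at hmem
      have hpcount : 0 < List.count "text" styles := List.count_pos_iff.mpr hm
      exact decide_eq_true (by omega)
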